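-- pv_equiv track=rewrite | github.com/Ms-Kings/dayversary-calculator | dayversary_calculator.py | is_exit
-- ===== SOURCE A (Python) =====
-- def is_exit(str):
--     n = ""
--     for x in str:
--         if x.isalpha():
--             n = n + x
--     all_alpha = n.lower()
--     if all_alpha == "exit":
--         return True
--     else:
--         return False
-- ===== SOURCE B (Python) =====
-- TARGET = "exit"
--
-- def is_exit(str):
--     i = 0
--     for x in str:
--         if x.isalpha():
--             if i >= 4 or x.lower() != TARGET[i]:
--                 return False
--             i = i + 1
--     return i == 4
-- ===== Notes on version B (the rewrite author's own statement) =====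
-- stated objective: alternative
-- what changed: B threads a match-pointer into the fixed target "exit" through a single pass with early exit, instead of accumulating a filtered string and lowercasing/comparing it at the end.
import Mathlib
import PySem

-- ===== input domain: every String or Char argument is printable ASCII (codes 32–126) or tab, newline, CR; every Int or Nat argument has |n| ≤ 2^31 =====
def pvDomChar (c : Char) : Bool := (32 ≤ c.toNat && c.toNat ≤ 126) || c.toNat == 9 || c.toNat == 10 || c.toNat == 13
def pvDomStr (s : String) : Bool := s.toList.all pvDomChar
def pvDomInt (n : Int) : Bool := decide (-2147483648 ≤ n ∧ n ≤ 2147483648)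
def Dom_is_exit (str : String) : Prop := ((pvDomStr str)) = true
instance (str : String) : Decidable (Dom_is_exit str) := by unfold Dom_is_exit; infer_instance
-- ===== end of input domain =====

-- B threads a match-pointer into the fixed target "exit" in one early-exit pass instead of building the filtered string first (objective: alternative).

-- ===== PORT A =====
def is_exit (str : String) : Bool :=
  let n := str.toList.foldl (fun n x => if PySem.Chars.isalpha x then n ++ [x] else n) []
  let all_alpha := PySem.Chars.lower n
  if all_alpha = "exit".toList then true else false

-- ===== PORT B =====
-- early returns of the Python loop become the `false` branches of the recursion
def exitGo : List Char → Nat → Bool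
  | [], i => i == 4
  | x :: xs, i =>
    if PySem.Chars.isalpha x then
      -- TARGET[i]: guarded by i < 4, so getD's default is never used
      if 4 ≤ i || (PySem.Chars.lowerChar x != "exit".toList.getD i ' ') then false
      else exitGo xs (i + 1)
    else exitGo xs i

def is_exit_alt (str : String) : Bool := exitGo str.toList 0

-- ===== PRECONDITION & SPEC =====
def Spec_is_exit (str : String) (out : Bool) : Prop := out = is_exit_alt str
instance (str : String) (out : Bool) : Decidable (Spec_is_exit str out) := by unfold Spec_is_exit; infer_instance

-- ===== CLAIM (what is proved, stated in full; the proofs are below) =====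
def Claim_equal_is_exit : Prop := ∀ (str : String), Dom_is_exit str → Spec_is_exit str (is_exit str)

-- ===== LEMMAS AND PROOFS =====

theorem exit_drop (i : Nat) (hi : i < 4) :
    "exit".toList.drop i = "exit".toList.getD i ' ' :: "exit".toList.drop (i + 1) := by
  interval_cases i <;> rfl

theorem exitGo_eq (xs : List Char) : ∀ i : Nat, i ≤ 4 →
    exitGo xs i = (PySem.Chars.lower (xs.filter PySem.Chars.isalpha) = "exit".toList.drop i) := by
  induction xs with
  | nil =>
    intro i hi
    rcases Nat.lt_or_ge i 4 with h | h
    · rw [exit_drop i h]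
      have h4 : (i == 4) = false := by simp; omega
      simp [exitGo, PySem.Chars.lower, h4]
    · have : i = 4 := le_antisymm hi h
      subst this
      simp [exitGo, PySem.Chars.lower]
  | cons x xs ih =>
    intro i hi
    by_cases hx : PySem.Chars.isalpha x
    · simp only [exitGo, hx, if_true, List.filter_cons_of_pos hx]
      by_cases h4 : 4 ≤ i
      · have : i = 4 := le_antisymm hi h4
        subst this
        simp [PySem.Chars.lower]
      · have hi' : i < 4 := lt_of_not_ge h4
        simp only [h4, decide_false, Bool.false_or]
        rw [exit_drop i hi']
        by_cases heq : PySem.Chars.lowerChar x = "exit".toList.getD i ' '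
        · simp only [heq, bne_self_eq_false, Bool.false_eq_true, if_false]
          rw [ih (i + 1) (by omega)]
          simp only [PySem.Chars.lower, List.map_cons, heq, List.cons.injEq,
            true_and]
        · simp only [bne_iff_ne, ne_eq, heq, not_false_eq_true, if_true]
          simp only [PySem.Chars.lower, List.map_cons, eq_iff_iff, List.cons.injEq,
            Bool.false_eq_true, false_iff]
          exact fun hab => heq hab.1
    · simp only [exitGo, hx, Bool.false_eq_true, if_false, List.filter_cons_of_neg hx]
      exact ih i hi

-- ===== VERDICT (by name: the statement is the Claim_ definition above) =====
theorem is_exit_spec : Claim_equal_is_exit := by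
  intro str _
  unfold Spec_is_exit is_exit is_exit_alt
  simp only [PySem.List.foldl_append_if_eq_filter, List.nil_append]
  have h := exitGo_eq str.toList 0 (by omega)
  rw [List.drop_zero] at h
  by_cases hc : PySem.Chars.lower (str.toList.filter PySem.Chars.isalpha) = "exit".toList
  · rw [if_pos hc]
    exact (cast h.symm hc).symm
  · rw [if_neg hc]
    cases hgo : exitGo str.toList 0 with
    | false => rfl
    | true => exact absurd (cast h hgo) hc
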